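-- pv_equiv track=rewrite | github.com/subhabrata-samajder/LinearCryptanalysisExperiment | SmallPresent.py | PermutationLayer
-- ===== SOURCE A (Python) =====
-- def PermutationLayer(State, n):
--     NewState = 0
--
--     for i in range(4*n):
--         if (i == 4*n - 1):
--             NewState ^= ((1 << (4*n - 1)) & State)
--
--         else:
--             Bit = (((1 << i) & State) >> i)
--
--             NewState ^= (Bit << ((n*i)%(4*n - 1)))
--
--     return NewState
-- ===== SOURCE B (Python) =====
-- def PermutationLayer(State, n):
--     # Two perfect riffle-unshuffle passes on the low 4n-1 bits (even-position
--     # bits become the low half, odd-position bits the high half), top bit fixed.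
--     if n <= 0:
--         return 0
--     m = 4 * n - 1
--
--     def unshuffle(x):
--         h = (m + 1) // 2
--         lo = sum(((x >> (2 * t)) & 1) << t for t in range(h))
--         hi = sum(((x >> (2 * t + 1)) & 1) << t for t in range(m - h))
--         return lo + (hi << h)
--
--     return (((State >> m) & 1) << m) + unshuffle(unshuffle(State))
-- ===== Notes on version B (the rewrite author's own statement) =====
-- stated objective: alternative
-- what changed: Replaces A's per-bit modular index arithmetic (XOR-scattering bit i to n*i mod (4n-1)) with two staged perfect riffle-unshuffle passes: each pass gathers the even-position bits of the low 4n-1 bits into the low half and the odd-position bits into the high half (position-halving mod 4n-1 applied twice inverts multiplication by n, since 4n ≡ 1), top bit kept fixed; no modular reduction is computed anywhere.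
import Mathlib
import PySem

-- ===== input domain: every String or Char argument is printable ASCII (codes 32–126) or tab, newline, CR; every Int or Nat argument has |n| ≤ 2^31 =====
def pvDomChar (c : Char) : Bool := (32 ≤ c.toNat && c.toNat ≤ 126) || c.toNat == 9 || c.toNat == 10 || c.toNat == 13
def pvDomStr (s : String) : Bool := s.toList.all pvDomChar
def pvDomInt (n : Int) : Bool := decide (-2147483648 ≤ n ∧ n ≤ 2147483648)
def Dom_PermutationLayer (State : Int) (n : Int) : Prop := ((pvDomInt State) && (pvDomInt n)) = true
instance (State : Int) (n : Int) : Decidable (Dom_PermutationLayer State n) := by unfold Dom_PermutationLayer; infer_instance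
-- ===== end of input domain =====

-- B replaces A's per-bit modular scatter by two staged perfect riffle-unshuffle passes
-- (even-position bits to the low half, odd-position bits to the high half) on the low
-- 4n-1 bits, top bit fixed; same return value, alternative algorithm (no speed claim).

-- ===== PORT A =====
-- literal transliteration of A; shift counts and mod results are ≥ 0 wherever the loop
-- body runs (range(4n) is nonempty only for n ≥ 1), so .toNat on them is exact
def PermutationLayer (State : Int) (n : Int) : Int :=
  (PySem.List.pyRange 0 (4*n) 1).foldl
    (fun NewState i =>
      if i = 4*n - 1 then
        PySem.Int.bxor NewState (PySem.Int.band ((1:Int) <<< (4*n-1).toNat) State)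
      else
        let Bit : Int := (PySem.Int.band ((1:Int) <<< i.toNat) State) >>> i.toNat
        PySem.Int.bxor NewState (Bit <<< (PySem.Int.mod (n*i) (4*n-1)).toNat))
    0

-- ===== PORT B =====
-- transliteration of Source B's helper 'unshuffle' (its two generator sums become sums of
-- mapped ranges; all indices and shift counts are ≥ 0, so .toNat is exact)
-- '((x >> s) & 1) << t', the summand of both generator sums (hoisted so the
-- shift counts are Nat, matching Python's nonnegative shifts)
def pvGatherBit (x : Int) (s : Int) (t : Int) : Int :=
  (PySem.Int.band (x >>> s.toNat) 1) <<< t.toNat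

def pvUnshuffle (m : Int) (x : Int) : Int :=
  let h : Int := PySem.Int.floordiv (m + 1) 2
  let lo : Int := ((PySem.List.pyRange 0 h 1).map (fun t => pvGatherBit x (2*t) t)).sum
  let hi : Int := ((PySem.List.pyRange 0 (m - h) 1).map (fun t => pvGatherBit x (2*t+1) t)).sum
  lo + (hi <<< h.toNat)

-- transliteration of B (two unshuffle passes plus the fixed top bit; 0 for n <= 0)
def PermutationLayer_alt (State : Int) (n : Int) : Int :=
  if n ≤ 0 then 0
  else
    let m : Int := 4*n - 1
    ((PySem.Int.band (State >>> m.toNat) 1) <<< m.toNat)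
      + pvUnshuffle m (pvUnshuffle m State)

-- ===== PRECONDITION & SPEC =====
def Spec_PermutationLayer (State : Int) (n : Int) (out : Int) : Prop := out = PermutationLayer_alt State n
instance (State : Int) (n : Int) (out : Int) : Decidable (Spec_PermutationLayer State n out) := by unfold Spec_PermutationLayer; infer_instance

-- ===== CLAIM (what is proved, stated in full; the proofs are below) =====
def Claim_equal_PermutationLayer : Prop := ∀ (State : Int) (n : Int), Dom_PermutationLayer State n → Spec_PermutationLayer State n (PermutationLayer State n)

-- ===== LEMMAS AND PROOFS =====

-- xor of disjoint nats is addition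
theorem pvXorAdd : ∀ a b : Nat, a &&& b = 0 → a ^^^ b = a + b := by
  intro a
  induction a using Nat.strong_induction_on with
  | _ a ih =>
    intro b h
    rcases Nat.eq_zero_or_pos a with ha | ha
    · simp [ha]
    · have h2 : a / 2 &&& b / 2 = 0 := by rw [← Nat.and_div_two, h]
      have ihv := ih (a / 2) (by omega) (b / 2) h2
      have hlow : (a.testBit 0 && b.testBit 0) = false := by
        rw [← Nat.testBit_and, h]; simp
      have hlow2 : ¬(a % 2 = 1 ∧ b % 2 = 1) := by
        intro hc
        simp [Nat.testBit_zero, hc.1, hc.2] at hlow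
      have hx2 : (a ^^^ b) / 2 = a / 2 ^^^ b / 2 := Nat.xor_div_two
      have hxm : (a ^^^ b) % 2 = (a + b) % 2 := Nat.xor_mod_two_eq
      omega

theorem pvDisj (b c p q : Nat) (hb : b ≤ 1) (hc : c ≤ 1) (hpq : p ≠ q) :
    (b * 2 ^ p) &&& (c * 2 ^ q) = 0 := by
  interval_cases b <;> interval_cases c <;> simp
  rw [Nat.and_two_pow, Nat.testBit_two_pow_of_ne hpq]
  simp

theorem pvFoldAux : ∀ (L : List Nat) (a : Nat),
    L.Pairwise (fun x y => x &&& y = 0) → (∀ x ∈ L, a &&& x = 0) →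
    L.foldl (· ^^^ ·) a = a + L.sum := by
  intro L
  induction L with
  | nil => simp
  | cons x L ih =>
    intro a hp ha
    rw [List.pairwise_cons] at hp
    have hax : a &&& x = 0 := ha x (by simp)
    have h1 : ∀ y ∈ L, (a ^^^ x) &&& y = 0 := by
      intro y hy
      rw [Nat.and_xor_distrib_right, ha y (by simp [hy]), hp.1 y hy]
      simp
    simp only [List.foldl_cons, List.sum_cons]
    rw [ih (a ^^^ x) hp.2 h1, pvXorAdd a x hax]
    omega

-- modular facts for M = 4*n' - 1
theorem pvMod4n (n' M : Nat) (hn : 1 ≤ n') (hM : M = 4 * n' - 1) : (4 * n') % M = 1 := by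
  have h1 : 4 * n' = M + 1 := by omega
  have h2 : 1 < M := by omega
  rw [h1, Nat.add_mod_left, Nat.mod_eq_of_lt h2]

theorem pvE2 (n' M i : Nat) (hn : 1 ≤ n') (hM : M = 4 * n' - 1) (hi : i < M) :
    (4 * ((n' * i) % M)) % M = i := by
  have h1 : (4 * ((n' * i) % M)) % M = (4 * (n' * i)) % M := by
    conv_rhs => rw [Nat.mul_mod]
    rw [Nat.mul_mod, Nat.mod_mod_of_dvd _ dvd_rfl]
  rw [h1, show 4 * (n' * i) = (4 * n') * i by ring, Nat.mul_mod,
    pvMod4n n' M hn hM, one_mul]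
  simp [Nat.mod_eq_of_lt hi]

theorem pvE1 (n' M j : Nat) (hn : 1 ≤ n') (hM : M = 4 * n' - 1) (hj : j < M) :
    (n' * ((4 * j) % M)) % M = j := by
  have h1 : (n' * ((4 * j) % M)) % M = (n' * (4 * j)) % M := by
    conv_rhs => rw [Nat.mul_mod]
    rw [Nat.mul_mod, Nat.mod_mod_of_dvd _ dvd_rfl]
  rw [h1, show n' * (4 * j) = (4 * n') * j by ring, Nat.mul_mod,
    pvMod4n n' M hn hM, one_mul, Nat.mod_mod_of_dvd _ dvd_rfl, Nat.mod_eq_of_lt hj]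

-- reindexing: scatter sum = gather sum
theorem pvReindex (b : Nat → Nat) (n' M : Nat) (hn : 1 ≤ n') (hM : M = 4 * n' - 1) :
    ∑ i ∈ Finset.range M, b i * 2 ^ ((n' * i) % M)
      = ∑ j ∈ Finset.range M, b ((4 * j) % M) * 2 ^ j := by
  have hMpos : 0 < M := by omega
  refine Finset.sum_nbij' (fun i => (n' * i) % M) (fun j => (4 * j) % M) ?_ ?_ ?_ ?_ ?_
  · intro i hi; simp only [Finset.mem_range] at *; exact Nat.mod_lt _ hMpos
  · intro j hj; simp only [Finset.mem_range] at *; exact Nat.mod_lt _ hMpos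
  · intro i hi; simp only [Finset.mem_range] at hi; exact pvE2 n' M i hn hM hi
  · intro j hj; simp only [Finset.mem_range] at hj; exact pvE1 n' M j hn hM hj
  · intro i hi; simp only [Finset.mem_range] at hi
    rw [pvE2 n' M i hn hM hi]

theorem pvListSumRange (n : Nat) (f : Nat → Nat) :
    ((List.range n).map f).sum = ∑ i ∈ Finset.range n, f i := by
  exact (Nat.add_zero (List.foldr (fun x1 x2 => x1 + x2) 0 (List.map f (List.range n)))).symm

-- main Nat-level identity: xor-scatter fold = top bit + gather sum
theorem pvNatMain (b : Nat → Nat) (hb : ∀ k, b k ≤ 1) (n' M : Nat)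
    (hn : 1 ≤ n') (hM : M = 4 * n' - 1) :
    ((List.range (M+1)).map
        (fun k => if k = M then b M * 2 ^ M else b k * 2 ^ ((n' * k) % M))).foldl (· ^^^ ·) 0
      = b M * 2 ^ M + ∑ j ∈ Finset.range M, b ((4 * j) % M) * 2 ^ j := by
  have hMpos : 0 < M := by omega
  set tA : Nat → Nat := fun k => if k = M then b M * 2 ^ M else b k * 2 ^ ((n' * k) % M) with htA
  have hinj : ∀ i i', i < M → i' < M → i ≠ i' → (n' * i) % M ≠ (n' * i') % M := by
    intro i i' hi hi' hne he
    apply hne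
    rw [← pvE2 n' M i hn hM hi, ← pvE2 n' M i' hn hM hi', he]
  have hpair : ((List.range (M+1)).map tA).Pairwise (fun x y => x &&& y = 0) := by
    rw [List.pairwise_map, List.pairwise_iff_getElem]
    intro i j hi hj hij
    simp only [List.length_range] at hi hj
    simp only [List.getElem_range]
    have hiM : i < M := by omega
    by_cases hjM : j = M
    · rw [htA]
      simp only [hjM, if_neg (by omega : ¬ i = M), if_true]
      exact pvDisj _ _ _ _ (hb i) (hb M) (by have := Nat.mod_lt (n' * i) hMpos; omega)
    · have hjM' : j < M := by omega
      rw [htA]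
      simp only [if_neg (by omega : ¬ i = M), if_neg hjM]
      exact pvDisj _ _ _ _ (hb i) (hb j) (hinj i j hiM hjM' (by omega))
  rw [pvFoldAux _ 0 hpair (by intro x _; exact Nat.zero_and x), Nat.zero_add,
    List.range_succ, List.map_append, List.sum_append]
  simp only [List.map_cons, List.map_nil, List.sum_cons, List.sum_nil, htA, if_true]
  have hmapc : (List.range M).map tA = (List.range M).map (fun k => b k * 2 ^ ((n' * k) % M)) := by
    apply List.map_congr_left
    intro k hk
    rw [List.mem_range] at hk
    simp [htA, if_neg (by omega : ¬ k = M)]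
  rw [hmapc, pvListSumRange, pvReindex b n' M hn hM]
  omega

-- the k-th two's-complement bit of S, as Python computes it
def pvBit (S : Int) (k : Nat) : Nat := ((S >>> k) % 2).toNat

theorem pvBit_le_one (S : Int) (k : Nat) : pvBit S k ≤ 1 := by
  unfold pvBit
  have h1 := Int.emod_nonneg (S >>> k) (by norm_num : (2:Int) ≠ 0)
  have h2 := Int.emod_lt_of_pos (S >>> k) (by norm_num : (0:Int) < 2)
  omega

theorem pvBit_cast (S : Int) (k : Nat) : (↑(pvBit S k) : Int) = (S >>> k) % 2 := by
  unfold pvBit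
  have h1 := Int.emod_nonneg (S >>> k) (by norm_num : (2:Int) ≠ 0)
  omega

-- (1 << k) & S  ==  ((S >> k) % 2) << k, Python-exactly (two's complement on negatives)
theorem pvBandPow (S : Int) (k : Nat) :
    PySem.Int.band ((1:Int) <<< k) S = ((S >>> k) % 2) * 2 ^ k := by
  rw [Int.shiftLeft_eq, one_mul, Int.shiftRight_eq_div_pow]
  by_cases hS : 0 ≤ S
  · obtain ⟨s, rfl⟩ := Int.eq_ofNat_of_zero_le hS
    have key : 2 ^ k &&& s = ((s / 2 ^ k) % 2) * 2 ^ k := by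
      rw [Nat.two_pow_and, Nat.testBit_eq_decide_div_mod_eq]
      by_cases h : s / 2 ^ k % 2 = 1
      · simp [h]
      · have h0 : s / 2 ^ k % 2 = 0 := by omega
        simp [h0]
    calc PySem.Int.band ((2:Int) ^ k) ↑s
        = PySem.Int.band ((2 ^ k : Nat) : Int) ↑s := by norm_cast
      _ = ((2 ^ k &&& s : Nat) : Int) := PySem.Int.band_natCast _ _
      _ = ((((s / 2 ^ k) % 2) * 2 ^ k : Nat) : Int) := by rw [key]
      _ = (↑s / ((2 ^ k : Nat) : Int)) % 2 * 2 ^ k := by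
          rw [← Int.natCast_ediv]; push_cast; ring
  · -- negative S: S = -(t+1)
    set t : Nat := (-S - 1).toNat with ht
    have hSt : S = -(↑t + 1) := by omega
    have hpow : (0:Int) < 2 ^ k := by positivity
    have hb : PySem.Int.band ((2:Int) ^ k) S
        = ↑(((2:Int) ^ k).toNat - (((2:Int) ^ k).toNat &&& (-S - 1).toNat)) := by
      unfold PySem.Int.band
      rw [if_pos (le_of_lt hpow), if_neg (by omega)]
    have htn : ((2:Int) ^ k).toNat = 2 ^ k := by
      have : ((2:Int) ^ k) = ((2 ^ k : Nat) : Int) := by push_cast; ring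
      omega
    rw [hb, htn, ← ht, Nat.two_pow_and]
    set q : Nat := t / 2 ^ k with hq
    set r : Nat := t % 2 ^ k with hr
    have hrlt : r < 2 ^ k := Nat.mod_lt _ (by positivity)
    have hqr : t = 2 ^ k * q + r := (Nat.div_add_mod t (2 ^ k)).symm
    have hdecomp : S = ((2:Int) ^ k - ↑r - 1) + (-(↑q) - 1) * 2 ^ k := by
      rw [hSt]; push_cast [hqr]; ring
    have hdiv : S / (2:Int) ^ k = -(↑q) - 1 := by
      rw [hdecomp, Int.add_mul_ediv_right _ _ (by positivity : (2:Int)^k ≠ 0),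
        Int.ediv_eq_zero_of_lt (by omega) (by omega)]
      ring
    rw [show ((2 ^ k : Nat) : Int) = (2:Int) ^ k from by push_cast; ring, hdiv]
    have hbit : t.testBit k = decide (q % 2 = 1) := by
      rw [Nat.testBit_eq_decide_div_mod_eq]
    by_cases h : q % 2 = 1
    · have : (-(↑q:Int) - 1) % 2 = 0 := by omega
      rw [this, hbit]; simp [h]
    · have h0 : q % 2 = 0 := by omega
      have : (-(↑q:Int) - 1) % 2 = 1 := by omega
      rw [this, hbit]; simp [h0]

theorem pvBitTerm (S : Int) (k : Nat) :
    (PySem.Int.band ((1:Int) <<< k) S) >>> k = (pvBit S k : Int) := by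
  rw [pvBandPow, Int.shiftRight_eq_div_pow, pvBit_cast,
    show ((2 ^ k : Nat) : Int) = (2:Int) ^ k from by push_cast; ring]
  exact Int.mul_ediv_cancel _ (by positivity)

theorem pvBandOne (S : Int) (k : Nat) :
    PySem.Int.band (S >>> k) 1 = (pvBit S k : Int) := by
  rw [PySem.Int.band_one, PySem.Int.mod_eq_emod_of_pos (by norm_num : (0:Int) < 2), pvBit_cast]

theorem pvFoldCast (f : Nat → Nat) : ∀ (L : List Nat) (a : Nat),
    L.foldl (fun acc k => PySem.Int.bxor acc ↑(f k)) (↑a : Int)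
      = ↑(L.foldl (fun acc k => acc ^^^ f k) a) := by
  intro L
  induction L with
  | nil => intro a; rfl
  | cons x L ih =>
    intro a
    simp only [List.foldl_cons, PySem.Int.bxor_natCast]
    exact ih (a ^^^ f x)

theorem pvAChar (S n : Int) (hn : 1 ≤ n) :
    PermutationLayer S n
      = ↑(((List.range ((4*n.toNat-1)+1)).map
            (fun k => if k = 4*n.toNat-1 then pvBit S (4*n.toNat-1) * 2 ^ (4*n.toNat-1)
                      else pvBit S k * 2 ^ ((n.toNat * k) % (4*n.toNat-1)))).foldl (· ^^^ ·) (0:Nat) : Nat) := by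
  set M : Nat := 4*n.toNat-1 with hMdef
  set tA : Nat → Nat := fun k => if k = M then pvBit S M * 2 ^ M
                                 else pvBit S k * 2 ^ ((n.toNat * k) % M) with htA
  have hM4 : (4*n - 1 : Int) = (M : Int) := by omega
  have hM1 : (4*n : Int) - 0 = ((M+1 : Nat) : Int) := by omega
  unfold PermutationLayer
  rw [PySem.List.pyRange_one, hM1, Int.toNat_natCast, List.foldl_map]
  have hbody : (fun (acc : Int) (k : Nat) =>
      if (0 : Int) + ↑k = 4*n - 1 then
        PySem.Int.bxor acc (PySem.Int.band ((1:Int) <<< (4*n-1).toNat) S)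
      else
        PySem.Int.bxor acc
          (((PySem.Int.band ((1:Int) <<< ((0:Int) + ↑k).toNat) S) >>> ((0:Int) + ↑k).toNat)
            <<< (PySem.Int.mod (n*((0:Int) + ↑k)) (4*n-1)).toNat))
      = fun acc k => PySem.Int.bxor acc ↑(tA k) := by
    funext acc k
    simp only [zero_add]
    by_cases hk : k = M
    · rw [if_pos (by rw [hk, hM4])]
      simp only [htA]
      rw [if_pos hk]
      have h1 : (4*n-1).toNat = M := by omega
      rw [h1, pvBandPow, ← pvBit_cast]
      norm_cast
    · rw [if_neg (by rw [hM4]; exact_mod_cast hk)]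
      simp only [htA, if_neg hk, Int.toNat_natCast]
      rw [pvBitTerm]
      have hmod : (PySem.Int.mod (n * ↑k) (4*n-1)).toNat = (n.toNat * k) % M := by
        have hnk : (n * (↑k:Int)) = ((n.toNat * k : Nat) : Int) := by
          push_cast [Int.toNat_of_nonneg (show (0:Int) ≤ n by omega)]
          ring
        rw [PySem.Int.mod_eq_emod_of_pos (by omega : (0:Int) < 4*n-1), hM4, hnk,
          ← Int.natCast_emod, Int.toNat_natCast]
      rw [hmod, Int.shiftLeft_eq]
      push_cast
      ring
  rw [hbody, List.foldl_map]
  have h0 := pvFoldCast tA (List.range (M+1)) 0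
  rw [Nat.cast_zero] at h0
  exact_mod_cast h0

-- ∑_{i<k} 2^i = 2^k - 1
theorem pvPow2Sum (k : Nat) : ∑ i ∈ Finset.range k, 2 ^ i = 2 ^ k - 1 := by
  induction k with
  | zero => simp
  | succ k ih =>
    rw [Finset.sum_range_succ, ih]
    have : 1 ≤ 2 ^ k := Nat.one_le_two_pow
    omega

-- the k-th bit of a binary sum of 0/1 digits is the k-th digit
theorem pvDigitOfSum (b : Nat → Nat) (hb : ∀ j, b j ≤ 1) (M k : Nat) (hk : k < M) :
    (∑ j ∈ Finset.range M, b j * 2 ^ j) / 2 ^ k % 2 = b k := by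
  have hsplit : ∑ j ∈ Finset.range M, b j * 2 ^ j
      = (∑ j ∈ Finset.range k, b j * 2 ^ j) + b k * 2 ^ k
        + 2 ^ (k+1) * ∑ t ∈ Finset.range (M - (k+1)), b (k+1+t) * 2 ^ t := by
    rw [show (Finset.range M) = Finset.range ((k+1) + (M - (k+1))) from by congr 1; omega,
      Finset.sum_range_add, Finset.sum_range_succ, Finset.mul_sum]
    congr 1
    apply Finset.sum_congr rfl
    intro t _
    rw [pow_add]
    ring
  have hlo : (∑ j ∈ Finset.range k, b j * 2 ^ j) < 2 ^ k := by
    calc (∑ j ∈ Finset.range k, b j * 2 ^ j) ≤ ∑ j ∈ Finset.range k, 2 ^ j := by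
          apply Finset.sum_le_sum
          intro j _
          have := hb j
          nlinarith [Nat.one_le_two_pow (n := j)]
      _ = 2 ^ k - 1 := pvPow2Sum k
      _ < 2 ^ k := by have : 1 ≤ 2 ^ k := Nat.one_le_two_pow; omega
  set L := ∑ j ∈ Finset.range k, b j * 2 ^ j with hL
  set H := ∑ t ∈ Finset.range (M - (k+1)), b (k+1+t) * 2 ^ t with hH
  rw [hsplit]
  have hrw : L + b k * 2 ^ k + 2 ^ (k+1) * H = L + 2 ^ k * (b k + 2 * H) := by
    rw [pow_succ]; ring
  rw [hrw, Nat.add_mul_div_left _ _ (by positivity : 0 < 2 ^ k),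
    Nat.div_eq_of_lt hlo, Nat.zero_add]
  have := hb k
  omega

theorem pvBitOfSum (b : Nat → Nat) (hb : ∀ j, b j ≤ 1) (M k : Nat) (hk : k < M) :
    pvBit ((∑ j ∈ Finset.range M, b j * 2 ^ j : Nat) : Int) k = b k := by
  unfold pvBit
  have hd := pvDigitOfSum b hb M k hk
  rw [Int.shiftRight_eq_div_pow, ← Int.natCast_ediv]
  omega

-- single unshuffle pass = gather with position doubling mod M
theorem pvUChar (x : Int) (M : Nat) (hM : 1 ≤ M) (hodd : M % 2 = 1) :
    pvUnshuffle (↑M) x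
      = ((∑ j ∈ Finset.range M, pvBit x ((2*j) % M) * 2 ^ j : Nat) : Int) := by
  set H : Nat := (M+1)/2 with hHdef
  have hh : PySem.Int.floordiv ((M:Int) + 1) 2 = (H : Int) := by
    rw [show ((M:Int) + 1) = ((M+1 : Nat) : Int) from by push_cast; ring]
    exact_mod_cast PySem.Int.floordiv_natCast (M+1) 2
  unfold pvUnshuffle
  rw [hh]
  simp only [Int.toNat_natCast]
  have hlosum : ((PySem.List.pyRange 0 (↑H) 1).map
      (fun t => pvGatherBit x (2*t) t)).sum
      = ((∑ t ∈ Finset.range H, pvBit x (2*t) * 2 ^ t : Nat) : Int) := by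
    rw [PySem.List.pyRange_one, show ((H:Int) - 0).toNat = H from by omega, List.map_map]
    have hmap : (List.range H).map
        ((fun t => pvGatherBit x (2*t) t) ∘ fun k => (0:Int) + ↑k)
        = (List.range H).map (fun k => ((pvBit x (2*k) * 2 ^ k : Nat) : Int)) := by
      apply List.map_congr_left
      intro k _
      simp only [Function.comp, zero_add]
      unfold pvGatherBit
      rw [show ((2:Int) * ↑k).toNat = 2*k from by omega, Int.toNat_natCast,
        pvBandOne, Int.shiftLeft_eq]
      push_cast
      ring
    rw [hmap, show (List.range H).map (fun k => ((pvBit x (2*k) * 2 ^ k : Nat) : Int))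
          = ((List.range H).map (fun k => pvBit x (2*k) * 2 ^ k)).map (fun v : Nat => (v : Int))
        from by rw [List.map_map]; rfl,
      ← Nat.cast_list_sum, pvListSumRange]
  have hMH : ((M:Int) - ↑H) = ((M - H : Nat) : Int) := by omega
  have hhisum : ((PySem.List.pyRange 0 ((M:Int) - ↑H) 1).map
      (fun t => pvGatherBit x (2*t+1) t)).sum
      = ((∑ t ∈ Finset.range (M - H), pvBit x (2*t+1) * 2 ^ t : Nat) : Int) := by
    rw [hMH, PySem.List.pyRange_one,
      show (((M - H : Nat) : Int) - 0).toNat = M - H from by omega, List.map_map]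
    have hmap : (List.range (M - H)).map
        ((fun t => pvGatherBit x (2*t+1) t) ∘ fun k => (0:Int) + ↑k)
        = (List.range (M - H)).map (fun k => ((pvBit x (2*k+1) * 2 ^ k : Nat) : Int)) := by
      apply List.map_congr_left
      intro k _
      simp only [Function.comp, zero_add]
      unfold pvGatherBit
      rw [show ((2:Int) * ↑k + 1).toNat = 2*k+1 from by omega, Int.toNat_natCast,
        pvBandOne, Int.shiftLeft_eq]
      push_cast
      ring
    rw [hmap, show (List.range (M - H)).map (fun k => ((pvBit x (2*k+1) * 2 ^ k : Nat) : Int))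
          = ((List.range (M - H)).map (fun k => pvBit x (2*k+1) * 2 ^ k)).map (fun v : Nat => (v : Int))
        from by rw [List.map_map]; rfl,
      ← Nat.cast_list_sum, pvListSumRange]
  rw [hlosum, hhisum, Int.shiftLeft_eq]
  -- combine into one range-M sum: low half from even positions, high half from odd
  have hHle : H ≤ M := by omega
  have hsplit : ∑ j ∈ Finset.range M, pvBit x ((2*j) % M) * 2 ^ j
      = (∑ t ∈ Finset.range H, pvBit x (2*t) * 2 ^ t)
        + (∑ t ∈ Finset.range (M - H), pvBit x (2*t+1) * 2 ^ t) * 2 ^ H := by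
    rw [show Finset.range M = Finset.range (H + (M - H)) from by congr 1; omega,
      Finset.sum_range_add, Finset.sum_mul]
    congr 1
    · apply Finset.sum_congr rfl
      intro t ht
      rw [Finset.mem_range] at ht
      rw [Nat.mod_eq_of_lt (by omega : 2*t < M)]
    · apply Finset.sum_congr rfl
      intro t ht
      rw [Finset.mem_range] at ht
      have h2 : 2*(H+t) % M = 2*t+1 := by
        have h2h : 2*H = M + 1 := by omega
        have : 2*(H+t) = M + (2*t+1) := by omega
        rw [this, Nat.add_mod_left, Nat.mod_eq_of_lt (by omega)]
      rw [h2, pow_add]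
      ring
  rw [hsplit]
  push_cast
  ring

-- two unshuffle passes = gather with 4j mod M
theorem pvBB (x : Int) (M : Nat) (hM : 1 ≤ M) (hodd : M % 2 = 1) :
    pvUnshuffle (↑M) (pvUnshuffle (↑M) x)
      = ((∑ j ∈ Finset.range M, pvBit x ((4*j) % M) * 2 ^ j : Nat) : Int) := by
  rw [pvUChar (pvUnshuffle (↑M) x) M hM hodd]
  congr 1
  apply Finset.sum_congr rfl
  intro j hj
  rw [Finset.mem_range] at hj
  have hlt : (2*j) % M < M := Nat.mod_lt _ (by omega)
  rw [pvUChar x M hM hodd,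
    pvBitOfSum (fun t => pvBit x ((2*t) % M)) (fun t => pvBit_le_one x _) M _ hlt]
  congr 2
  -- 2*((2*j) % M) % M = 4*j % M
  conv_lhs => rw [Nat.mul_mod, Nat.mod_mod_of_dvd _ dvd_rfl, ← Nat.mul_mod]
  congr 1
  ring

theorem pvBChar (S n : Int) (hn : 1 ≤ n) :
    PermutationLayer_alt S n
      = ((pvBit S (4*n.toNat-1) * 2 ^ (4*n.toNat-1)
          + ∑ j ∈ Finset.range (4*n.toNat-1),
              pvBit S ((4*j) % (4*n.toNat-1)) * 2 ^ j : Nat) : Int) := by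
  set M : Nat := 4*n.toNat-1 with hMdef
  have hM4 : (4*n - 1 : Int) = (M : Int) := by omega
  have h1 : (4*n - 1).toNat = M := by omega
  unfold PermutationLayer_alt
  rw [if_neg (by omega)]
  simp only []
  rw [h1, pvBandOne, Int.shiftLeft_eq, hM4,
    pvBB S M (by omega) (by omega)]
  push_cast
  ring

theorem pvMain (State n : Int) : PermutationLayer State n = PermutationLayer_alt State n := by
  by_cases hn : n ≤ 0
  · unfold PermutationLayer PermutationLayer_alt
    rw [if_pos hn, PySem.List.pyRange_one_eq_nil (by omega : (4*n:Int) ≤ 0)]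
    rfl
  · rw [pvAChar State n (by omega), pvBChar State n (by omega)]
    rw [show (((List.range ((4*n.toNat-1)+1)).map
          (fun k => if k = 4*n.toNat-1 then pvBit State (4*n.toNat-1) * 2 ^ (4*n.toNat-1)
                    else pvBit State k * 2 ^ ((n.toNat * k) % (4*n.toNat-1)))).foldl (· ^^^ ·) (0:Nat))
        = pvBit State (4*n.toNat-1) * 2 ^ (4*n.toNat-1)
          + ∑ j ∈ Finset.range (4*n.toNat-1),
              pvBit State ((4*j) % (4*n.toNat-1)) * 2 ^ j from
      pvNatMain (pvBit State) (pvBit_le_one State) n.toNat (4*n.toNat-1) (by omega) rfl]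

-- ===== VERDICT (by name: the statement is the Claim_ definition above) =====
theorem PermutationLayer_spec : Claim_equal_PermutationLayer := by
  intro State n _
  unfold Spec_PermutationLayer
  exact pvMain State n
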